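-- pv_equiv track=rewrite | github.com/TimFoundATerminal/mvl-processors | Verilog/ternary/programs/compiler.py | int_to_balanced_ternary_to_binary
-- ===== SOURCE A (Python) =====
-- _1 = 0b11 # -1 (2)
--
-- _0 = 0b00 # 0
--
-- _1_ = 0b01 # 1
--
-- def int_to_balanced_ternary_to_binary(value):
--     """
--     Convert an integer to balanced ternary representation, then interpret
--     that representation as binary and convert back to an integer.
--
--     Balanced ternary bit encoding:
--     -1 = 0b11 (_1)
--     0 = 0b00 (_0)
--     1 = 0b01 (_1_)
--     """
--     if value == 0:
--         # return {
--         #     "original_value": 0,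
--         #     "balanced_ternary_trits": [0b00],
--         #     "balanced_ternary_formatted": ["_0"],
--         #     "binary_representation": "00",
--         #     "binary_value": 0
--         # }
--         return 0
--
--     # Define the ternary digit encodings
--     trit_encodings = {
--         -1: _1,
--         0: _0,
--         1: _1_
--     }
--
--     trit_names = {
--         0b11: "_1",   # -1
--         0b00: "_0",   # 0
--         0b01: "_1_"   # 1
--     }
--
--     # Convert to balanced ternary
--     trits = []
--
--     # Handle negative values by taking the absolute value and negating each trit at the end
--     is_negative = value < 0
--     abs_value = abs(value)
--
--     while abs_value > 0:
--         remainder = abs_value % 3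
--
--         if remainder == 2:
--             # In balanced ternary, 2 is represented as -1 in the next position
--             trit = -1
--             abs_value = (abs_value + 1) // 3
--         else:
--             trit = remainder
--             abs_value = abs_value // 3
--
--         # If the original value was negative, negate the trit
--         if is_negative:
--             trit = -trit
--
--         trits.append(trit_encodings[trit])
--
--     # Reverse the list since we built it from least to most significant
--     trits.reverse()
--
--     # Format the trits for display
--     formatted_trits = [trit_names[trit] for trit in trits]
--
--     # Convert the binary representation to an integer
--     binary_string = ''.join([f"{trit:02b}" for trit in trits])
--     binary_value = int(binary_string, 2)
--
--     # return {
--     #     "original_value": value,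
--     #     "balanced_ternary_trits": trits,
--     #     "balanced_ternary_formatted": formatted_trits,
--     #     "binary_representation": binary_string,
--     #     "binary_value": binary_value
--     # }
--     return binary_value
-- ===== SOURCE B (Python) =====
-- def int_to_balanced_ternary_to_binary(value):
--     # Signed balanced-ternary digits via Python's floored % and //, accumulating
--     # the 2-bit codes (-1 -> 0b11, 0 -> 0b00, 1 -> 0b01) LSB-first; no abs/negate,
--     # no list, no string formatting/parsing.
--     result = 0
--     power = 1
--     while value != 0:
--         r = value % 3
--         if r == 2:
--             code = 0b11          # trit -1
--             value = (value + 1) // 3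
--         else:
--             code = r             # trit 0 or 1
--             value //= 3
--         result += code * power
--         power *= 4
--     return result
-- ===== Notes on version B (the rewrite author's own statement) =====
-- stated objective: simpler
-- what changed: B drops A's abs/is_negative/negate machinery, trit list, reverse, dict lookups and string format/parse round-trip: it divides the signed value directly with Python's floored % and //, and accumulates the 2-bit codes numerically (result += code*power, power *= 4) in one short loop.
import Mathlib
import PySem

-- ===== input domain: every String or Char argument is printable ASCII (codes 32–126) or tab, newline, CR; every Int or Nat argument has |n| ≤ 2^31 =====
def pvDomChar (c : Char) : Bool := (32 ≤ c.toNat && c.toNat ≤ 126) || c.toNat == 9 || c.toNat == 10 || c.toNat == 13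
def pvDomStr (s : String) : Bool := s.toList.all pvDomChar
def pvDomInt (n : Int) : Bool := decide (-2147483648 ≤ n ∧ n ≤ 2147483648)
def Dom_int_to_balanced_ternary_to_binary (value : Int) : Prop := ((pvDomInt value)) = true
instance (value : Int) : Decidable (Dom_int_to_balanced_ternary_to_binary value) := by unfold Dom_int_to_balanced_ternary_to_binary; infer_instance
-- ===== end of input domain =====

-- B replaces A's abs/negate machinery, trit list, reverse and string format/parse
-- round-trip by one signed floored-division loop accumulating the 2-bit codes
-- numerically (objective: simpler).

-- ===== PORT A =====
-- trit_encodings = {-1: 0b11, 0: 0b00, 1: 0b01}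
def pvATritEncodings : PySem.Dict Int Int := PySem.Dict.ofList [(-1, 3), (0, 0), (1, 1)]

-- the 'while abs_value > 0' loop, appending encoded trits (lookup can never miss,
-- so the KeyError default 0 is unreachable)
def pvALoop (absValue : Int) (isNegative : Bool) (trits : List Int) : List Int :=
  if absValue > 0 then
    let remainder := PySem.Int.mod absValue 3
    if remainder = 2 then
      let trit : Int := -1
      let trit := if isNegative then -trit else trit
      pvALoop (PySem.Int.floordiv (absValue + 1) 3) isNegative
        (trits ++ [pvATritEncodings.getD trit 0])
    else
      let trit := remainder
      let trit := if isNegative then -trit else trit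
      pvALoop (PySem.Int.floordiv absValue 3) isNegative
        (trits ++ [pvATritEncodings.getD trit 0])
  else trits
termination_by absValue.toNat
decreasing_by
  · simp only [PySem.Int.floordiv_eq_ediv_of_pos (by norm_num : (0:Int) < 3)]
    omega
  · have hm : PySem.Int.mod absValue 3 = absValue % 3 :=
      PySem.Int.mod_eq_emod_of_pos (by norm_num)
    simp only [PySem.Int.floordiv_eq_ediv_of_pos (by norm_num : (0:Int) < 3), hm] at *
    omega

-- f"{t:02b}" for t ≥ 0, ported by hand: binary digits, zero-padded to width 2 (exact there)
def pvBinDigits : Nat → List Char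
  | 0 => []
  | n+1 => pvBinDigits ((n+1)/2) ++ [if (n+1) % 2 = 1 then '1' else '0']

def pvFmt02b (t : Int) : String :=
  let ds := if t = 0 then ['0'] else pvBinDigits t.toNat
  String.ofList (List.replicate (2 - ds.length) '0' ++ ds)

-- int(s, 2), ported by hand (exact on non-empty strings of '0'/'1')
def pvParseBin (s : String) : Int :=
  s.toList.foldl (fun a c => 2 * a + (if c = '1' then 1 else 0)) 0

def int_to_balanced_ternary_to_binary (value : Int) : Int :=
  if value = 0 then 0
  else
    let isNegative := value < 0
    let absValue := |value|
    let trits := pvALoop absValue isNegative []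
    let trits := trits.reverse
    -- formatted_trits is computed but unused in A; omitted
    let binaryString := PySem.Str.join "" (trits.map pvFmt02b)
    pvParseBin binaryString

-- ===== PORT B =====
def pvBLoop (value result power : Int) : Int :=
  if value = 0 then result
  else if PySem.Int.mod value 3 = 2 then
    pvBLoop (PySem.Int.floordiv (value + 1) 3) (result + 3 * power) (power * 4)
  else
    pvBLoop (PySem.Int.floordiv value 3) (result + PySem.Int.mod value 3 * power) (power * 4)
termination_by value.natAbs
decreasing_by
  · have hm : PySem.Int.mod value 3 = value % 3 :=
      PySem.Int.mod_eq_emod_of_pos (by norm_num)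
    simp only [PySem.Int.floordiv_eq_ediv_of_pos (by norm_num : (0:Int) < 3), hm] at *
    omega
  · have hm : PySem.Int.mod value 3 = value % 3 :=
      PySem.Int.mod_eq_emod_of_pos (by norm_num)
    simp only [PySem.Int.floordiv_eq_ediv_of_pos (by norm_num : (0:Int) < 3), hm] at *
    omega

def int_to_balanced_ternary_to_binary_alt (value : Int) : Int := pvBLoop value 0 1

-- ===== PRECONDITION & SPEC =====
def Spec_int_to_balanced_ternary_to_binary (value : Int) (out : Int) : Prop := out = int_to_balanced_ternary_to_binary_alt value
instance (value : Int) (out : Int) : Decidable (Spec_int_to_balanced_ternary_to_binary value out) := by unfold Spec_int_to_balanced_ternary_to_binary; infer_instance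

-- ===== CLAIM (what is proved, stated in full; the proofs are below) =====
def Claim_equal_int_to_balanced_ternary_to_binary : Prop := ∀ (value : Int), Dom_int_to_balanced_ternary_to_binary value → Spec_int_to_balanced_ternary_to_binary value (int_to_balanced_ternary_to_binary value)

-- ===== LEMMAS AND PROOFS =====

-- the signed balanced-ternary 2-bit-code list of v, least significant first
def pvCodes (v : Int) : List Int :=
  if v = 0 then []
  else if PySem.Int.mod v 3 = 2 then 3 :: pvCodes (PySem.Int.floordiv (v + 1) 3)
  else PySem.Int.mod v 3 :: pvCodes (PySem.Int.floordiv v 3)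
termination_by v.natAbs
decreasing_by
  all_goals
    have hm : PySem.Int.mod v 3 = v % 3 :=
      PySem.Int.mod_eq_emod_of_pos (by norm_num)
    simp only [PySem.Int.floordiv_eq_ediv_of_pos (by norm_num : (0:Int) < 3), hm] at *
    omega

theorem pvBLoop_eq (value result power : Int) :
    pvBLoop value result power =
      result + power * (pvCodes value).foldr (fun c a => c + 4 * a) 0 := by
  fun_induction pvBLoop value result power
  all_goals rw [pvCodes]
  · simp [*]
  · rename_i v res pow h hr ih
    rw [if_neg h, if_pos hr]
    simp only [List.foldr_cons]
    rw [ih]; ring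
  · rename_i v res pow h hr ih
    rw [if_neg h, if_neg hr]
    simp only [List.foldr_cons]
    rw [ih]; ring

theorem pvCodes_mem (v : Int) : ∀ c ∈ pvCodes v, c = 0 ∨ c = 1 ∨ c = 3 := by
  fun_induction pvCodes v
  · simp
  · rename_i v h hr ih
    intro c hc
    rcases List.mem_cons.mp hc with h' | h'
    · simp [h']
    · exact ih c h'
  · rename_i v h hr ih
    intro c hc
    have hm : PySem.Int.mod v 3 = v % 3 :=
      PySem.Int.mod_eq_emod_of_pos (by norm_num)
    rcases List.mem_cons.mp hc with h' | h'
    · rw [hm] at hr h'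
      omega
    · exact ih c h'

-- A's trit stream on |v| with the sign flag equals pvCodes v (strong induction on |v|)
theorem pvALoop_codes (n : Nat) : ∀ (v : Int), v.natAbs ≤ n → ∀ (neg : Bool) (acc : List Int),
    (0 < v → neg = false) → (v < 0 → neg = true) →
    pvALoop |v| neg acc = acc ++ pvCodes v := by
  induction n with
  | zero =>
      intro v hv neg acc _ _
      have h0 : v = 0 := by omega
      subst h0
      rw [pvALoop, pvCodes]
      simp
  | succ n ih =>
      intro v hv neg acc hpos hneg
      by_cases h0 : v = 0
      · subst h0
        rw [pvALoop, pvCodes]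
        simp
      · have habs : (0:Int) < |v| := abs_pos.mpr h0
        have hmB : PySem.Int.mod v 3 = v % 3 :=
          PySem.Int.mod_eq_emod_of_pos (by norm_num)
        have hdv : ∀ a : Int, PySem.Int.floordiv a 3 = a / 3 := fun a =>
          PySem.Int.floordiv_eq_ediv_of_pos (by norm_num)
        have henc3 : pvATritEncodings.getD (-1) 0 = 3 := by decide
        have henc0 : pvATritEncodings.getD 0 0 = 0 := by decide
        have henc1 : pvATritEncodings.getD 1 0 = 1 := by decide
        have hfalse : ((false : Bool) = true) = False := by simp
        rw [pvALoop, pvCodes, if_pos habs, if_neg h0]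
        rcases lt_or_gt_of_ne h0 with hvneg | hvpos
        · -- v < 0 : the loop runs on -v with the negate flag on
          have hne : neg = true := hneg hvneg
          subst hne
          have habs' : |v| = -v := abs_of_neg hvneg
          have hmA : PySem.Int.mod (-v) 3 = (-v) % 3 :=
            PySem.Int.mod_eq_emod_of_pos (by norm_num)
          rw [habs']
          simp only [hmA, hmB, hdv, if_true]
          rcases (by omega : v % 3 = 0 ∨ v % 3 = 1 ∨ v % 3 = 2) with hr | hr | hr
          · have ihh := ih (v / 3) (by omega) true (acc ++ [0]) (by omega) (fun _ => rfl)
            rw [show |v / 3| = (-v) / 3 from by rw [abs_of_nonpos (by omega)]; omega] at ihh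
            rw [if_neg (by omega : ¬ (-v) % 3 = 2), if_neg (by omega : ¬ v % 3 = 2),
              (by omega : (-v) % 3 = 0), hr, neg_zero, henc0, ihh]
            simp
          · have ihh := ih (v / 3) (by omega) true (acc ++ [1]) (by omega) (fun _ => rfl)
            rw [show |v / 3| = (-v + 1) / 3 from by rw [abs_of_nonpos (by omega)]; omega] at ihh
            rw [if_pos (by omega : (-v) % 3 = 2), if_neg (by omega : ¬ v % 3 = 2), hr,
              neg_neg, henc1, ihh]
            simp
          · have ihh := ih ((v + 1) / 3) (by omega) true (acc ++ [3]) (by omega) (fun _ => rfl)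
            rw [show |(v + 1) / 3| = (-v) / 3 from by rw [abs_of_nonpos (by omega)]; omega] at ihh
            rw [if_neg (by omega : ¬ (-v) % 3 = 2), if_pos hr,
              (by omega : (-v) % 3 = 1), henc3, ihh]
            simp
        · -- 0 < v : the flag is off, trits are kept as computed
          have hne : neg = false := hpos hvpos
          subst hne
          have habs' : |v| = v := abs_of_pos hvpos
          rw [habs']
          simp only [hmB, hdv, hfalse, if_false]
          rcases (by omega : v % 3 = 0 ∨ v % 3 = 1 ∨ v % 3 = 2) with hr | hr | hr
          · have ihh := ih (v / 3) (by omega) false (acc ++ [0]) (fun _ => rfl) (by omega)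
            rw [abs_of_nonneg (by omega : (0:Int) ≤ v / 3)] at ihh
            rw [if_neg (by omega : ¬ v % 3 = 2), if_neg (by omega : ¬ v % 3 = 2), hr, henc0, ihh]
            simp
          · have ihh := ih (v / 3) (by omega) false (acc ++ [1]) (fun _ => rfl) (by omega)
            rw [abs_of_nonneg (by omega : (0:Int) ≤ v / 3)] at ihh
            rw [if_neg (by omega : ¬ v % 3 = 2), if_neg (by omega : ¬ v % 3 = 2), hr, henc1, ihh]
            simp
          · have ihh := ih ((v + 1) / 3) (by omega) false (acc ++ [3]) (fun _ => rfl) (by omega)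
            rw [abs_of_nonneg (by omega : (0:Int) ≤ (v + 1) / 3)] at ihh
            rw [if_pos hr, if_pos hr, henc3, ihh]
            simp

theorem pvALoop_eq_codes (v : Int) :
    pvALoop |v| (decide (v < 0)) [] = pvCodes v := by
  have := pvALoop_codes v.natAbs v le_rfl (decide (v < 0)) []
    (fun h => by simp [decide_eq_false (by omega : ¬ v < 0)])
    (fun h => by simp [h])
  simpa using this

-- [].intercalate = flatten (''.join concatenates)
theorem pvIntercalate_nil (l : List (List Char)) :
    List.intercalate ([] : List Char) l = l.flatten := by
  induction l with
  | nil => rfl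
  | cons x xs ih =>
      cases xs with
      | nil => simp [List.intercalate]
      | cons y t => simp_all [List.intercalate, List.intersperse]

-- one 2-bit block: parsing f"{c:02b}" after accumulator a multiplies by 4 and adds c
theorem pvParse_block (c a : Int) (h : c = 0 ∨ c = 1 ∨ c = 3) :
    (pvFmt02b c).toList.foldl (fun a c => 2 * a + (if c = '1' then 1 else 0)) a = 4 * a + c := by
  rcases h with h | h | h <;> subst h <;>
    · simp [pvFmt02b, pvBinDigits, List.foldl]
      ring

-- ''.join concatenates: toList of the join is the flatten of the parts
theorem pvJoin_nil_toList (parts : List String) :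
    (PySem.Str.join "" parts).toList = (parts.map String.toList).flatten := by
  rw [PySem.Str.toList_join]
  simp only [PySem.Chars.join, String.toList_empty]
  exact pvIntercalate_nil _

-- parsing the joined 2-bit formats MSB-first equals the foldr value
theorem pvParse_join (ts : List Int) (h : ∀ c ∈ ts, c = 0 ∨ c = 1 ∨ c = 3) :
    pvParseBin (PySem.Str.join "" (ts.reverse.map pvFmt02b)) =
      ts.foldr (fun c a => c + 4 * a) 0 := by
  unfold pvParseBin
  rw [pvJoin_nil_toList, List.map_map, List.foldl_flatten, List.foldl_map,
    List.foldl_reverse]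
  induction ts with
  | nil => rfl
  | cons c rest ih =>
      simp only [List.foldr_cons, Function.comp_apply]
      have ih' := ih (fun x hx => h x (List.mem_cons_of_mem _ hx))
      simp only [Function.comp_apply] at ih'
      rw [ih', pvParse_block c _ (h c List.mem_cons_self)]
      ring

-- ===== VERDICT (by name: the statement is the Claim_ definition above) =====
theorem int_to_balanced_ternary_to_binary_spec : Claim_equal_int_to_balanced_ternary_to_binary := by
  intro value _
  unfold Spec_int_to_balanced_ternary_to_binary int_to_balanced_ternary_to_binary int_to_balanced_ternary_to_binary_alt
  rw [pvBLoop_eq]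
  by_cases h0 : value = 0
  · simp [h0, pvCodes]
  · simp only [if_neg h0]
    rw [pvALoop_eq_codes, pvParse_join _ (pvCodes_mem value)]
    ring
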